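-- pv_equiv track=rewrite | github.com/vAlgobot/vAlgo | utils/indicator_discovery.py | generate_discovery_report
-- ===== SOURCE A (Python) =====
-- from typing import Dict, List, Any, Optional, Set
--
-- def generate_discovery_report(indicators: List[Dict[str, Any]]) -> str:
--     """Generate a summary report of discovered indicators"""
--     if not indicators:
--         return "No indicators discovered"
--
--     # Group by category
--     categories = {}
--     for indicator in indicators:
--         category = indicator.get('category', 'unknown')
--         if category not in categories:
--             categories[category] = []
--         categories[category].append(indicator['name'])
--
--     # Build report
--     report_lines = [
--         f"Indicator Discovery Report",
--         f"=" * 50,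
--         f"Total Indicators: {len(indicators)}",
--         f"",
--         f"By Category:",
--         f"-" * 30
--     ]
--
--     for category, names in sorted(categories.items()):
--         report_lines.append(f"{category}: {len(names)} indicators")
--         for name in sorted(names):
--             report_lines.append(f"  - {name}")
--         report_lines.append("")
--
--     return "\n".join(report_lines)
-- ===== SOURCE B (Python) =====
-- def generate_discovery_report(indicators):
--     """Generate a summary report of discovered indicators"""
--     if not indicators:
--         return "No indicators discovered"
--
--     pairs = [(i.get('category', 'unknown'), i['name']) for i in indicators]
--
--     lines = [
--         "Indicator Discovery Report",
--         "=" * 50,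
--         f"Total Indicators: {len(indicators)}",
--         "",
--         "By Category:",
--         "-" * 30,
--     ]
--     for category in sorted({c for c, _ in pairs}):
--         names = sorted(n for c, n in pairs if c == category)
--         lines.append(f"{category}: {len(names)} indicators")
--         lines += [f"  - {n}" for n in names]
--         lines.append("")
--     return "\n".join(lines)
-- ===== Notes on version B (the rewrite author's own statement) =====
-- stated objective: simpler
-- what changed: A builds a category->names dict in one pass and then sorts its items and each name list; B flattens each indicator to a (category, name) pair once and, for each sorted distinct category, filters and sorts that category's names directly, with comprehensions instead of the dict accumulator.
import Mathlib
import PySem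

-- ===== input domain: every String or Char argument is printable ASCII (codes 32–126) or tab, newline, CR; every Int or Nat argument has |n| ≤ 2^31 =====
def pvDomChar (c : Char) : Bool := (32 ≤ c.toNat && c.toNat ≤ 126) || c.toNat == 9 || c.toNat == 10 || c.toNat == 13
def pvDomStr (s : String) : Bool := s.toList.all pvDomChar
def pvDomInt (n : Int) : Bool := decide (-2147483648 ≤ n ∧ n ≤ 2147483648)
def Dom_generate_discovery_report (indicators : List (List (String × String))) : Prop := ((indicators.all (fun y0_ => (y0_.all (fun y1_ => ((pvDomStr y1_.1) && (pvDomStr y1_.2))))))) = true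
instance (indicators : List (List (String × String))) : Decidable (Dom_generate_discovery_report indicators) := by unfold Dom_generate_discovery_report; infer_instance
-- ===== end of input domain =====

-- B replaces A's one-pass dict-grouping accumulator by sorted distinct categories + a per-category filter-and-sort (simpler decomposition, same return value).

-- ===== PORT A =====
-- A's grouping loop; '"=" * 50' / '"-" * 30' are written as the constant strings they evaluate to.
-- indicator['name'] raises KeyError when the key is missing; Pre_ excludes that, so the total form getD "name" "" is exact on Pre_.
def generate_discovery_report (indicators : List (List (String × String))) : String :=
  if indicators = [] then "No indicators discovered"
  else
    let categories : PySem.Dict String (List String) := indicators.foldl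
      (fun cs ind =>
        let category := (PySem.Dict.mk ind).getD "category" "unknown"
        let name := (PySem.Dict.mk ind).getD "name" ""
        let cs := if cs.contains category then cs else cs.insert category ([] : List String)
        cs.modify category [] (fun l => l ++ [name]))
      (PySem.Dict.mk [])
    let report_lines : List String := [
      "Indicator Discovery Report",
      "==================================================",
      "Total Indicators: " ++ PySem.Int.toStr (indicators.length : Int),
      "",
      "By Category:",
      "------------------------------"]
    -- sorted(categories.items()): dict keys are distinct, so Python's tuple comparison is decided by the key (first component).
    let report_lines := (PySem.List.sorted categories.items (fun p => p.1) false).foldl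
      (fun ls p =>
        let ls := ls ++ [p.1 ++ ": " ++ PySem.Int.toStr (p.2.length : Int) ++ " indicators"]
        let ls := (PySem.List.sorted p.2 (fun n => n) false).foldl (fun ls n => ls ++ ["  - " ++ n]) ls
        ls ++ [""]) report_lines
    PySem.Str.join "\n" report_lines

-- ===== PORT B =====
def generate_discovery_report_alt (indicators : List (List (String × String))) : String :=
  if indicators = [] then "No indicators discovered"
  else
    let pairs := indicators.map
      (fun i => ((PySem.Dict.mk i).getD "category" "unknown", (PySem.Dict.mk i).getD "name" ""))
    let lines : List String := [
      "Indicator Discovery Report",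
      "==================================================",
      "Total Indicators: " ++ PySem.Int.toStr (indicators.length : Int),
      "",
      "By Category:",
      "------------------------------"]
    let lines := (PySem.List.sorted (PySem.Set.ofList (pairs.map (fun p => p.1))) (fun c => c) false).foldl
      (fun ls category =>
        let names := PySem.List.sorted ((pairs.filter (fun p => p.1 == category)).map (fun p => p.2)) (fun n => n) false
        ls ++ [category ++ ": " ++ PySem.Int.toStr (names.length : Int) ++ " indicators"]
           ++ names.map (fun n => "  - " ++ n) ++ [""]) lines
    PySem.Str.join "\n" lines

-- ===== PRECONDITION & SPEC =====
-- Pre_ excludes exactly the inputs where A raises KeyError: an indicator without a 'name' key.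
def Pre_generate_discovery_report (indicators : List (List (String × String))) : Prop :=
  (indicators.all (fun ind => ind.any (fun p => p.1 == "name"))) = true
instance (indicators : List (List (String × String))) : Decidable (Pre_generate_discovery_report indicators) := by unfold Pre_generate_discovery_report; infer_instance
def pvWitness_generate_discovery_report : (List (List (String × String))) :=
  [[("name", "rsi"), ("category", "momentum")], [("name", "ema")]]
def Spec_generate_discovery_report (indicators : List (List (String × String))) (out : String) : Prop := out = generate_discovery_report_alt indicators
instance (indicators : List (List (String × String))) (out : String) : Decidable (Spec_generate_discovery_report indicators out) := by unfold Spec_generate_discovery_report; infer_instance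

-- ===== CLAIM (what is proved, stated in full; the proofs are below) =====
def Claim_equal_generate_discovery_report : Prop := ∀ (indicators : List (List (String × String))), Dom_generate_discovery_report indicators → Pre_generate_discovery_report indicators → Spec_generate_discovery_report indicators (generate_discovery_report indicators)

-- ===== LEMMAS AND PROOFS =====

-- A's conditional "insert empty list, then append" step is a single modify step.
theorem pv_step_eq (cs : PySem.Dict String (List String)) (k : String) (v : String) :
    (if cs.contains k then cs else cs.insert k ([] : List String)).modify k [] (fun l => l ++ [v])
      = cs.modify k [] (fun l => l ++ [v]) := by
  by_cases h : cs.contains k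
  · simp [h]
  · rw [if_neg (by simp [h])]
    replace h : cs.contains k = false := by simpa using h
    have hmem : ∀ (a : String) (b : List String), (a, b) ∈ cs.items → ¬ a = k := by
      simpa [PySem.Dict.contains] using h
    simp only [PySem.Dict.modify, PySem.Dict.getD_insert_self,
      PySem.Dict.getD_of_not_contains _ _ h]
    simp only [PySem.Dict.insert, PySem.Dict.contains]
    have hany : (cs.items.any fun p => p.1 == k) = false := by
      simp only [List.any_eq_false]
      intro p hp; simpa using hmem p.1 p.2 hp
    simp [List.any_append, hany]
    have : List.map (fun p : String × List String => if p.1 = k then (k, [v]) else p) cs.items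
         = List.map id cs.items :=
      List.map_congr_left (fun p hp => by simp [hmem p.1 p.2 hp])
    rw [this, List.map_id]

-- A's sorted item list is the sorted distinct categories, each paired with its (unsorted) name group.
theorem pv_items_eq (pairs : List (String × String)) :
    PySem.List.sorted (pairs.foldl (fun d p => d.modify p.1 [] (fun l => l ++ [p.2])) (PySem.Dict.mk [])).items (fun p => p.1) false
      = (PySem.List.sorted (PySem.Set.ofList (pairs.map (fun p => p.1))) (fun c => c) false).map
          (fun c => (c, (pairs.filter (fun p => p.1 == c)).map (fun p => p.2))) := by
  set D := pairs.foldl (fun d p => d.modify p.1 [] (fun l => l ++ [p.2])) (PySem.Dict.mk []) with hD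
  have hkeys : D.keys = PySem.Set.ofList (pairs.map (fun p => p.1)) := by
    rw [hD, PySem.Dict.keys_foldl_modify_key pairs (fun p => p.1) [] (fun _ p l => l ++ [p.2])]
    rfl
  have hnd : D.keys.Nodup := by
    rw [hD]
    exact PySem.Dict.nodup_keys_foldl_modify_key pairs (fun p => p.1) [] (fun _ p l => l ++ [p.2]) _ (by simp [PySem.Dict.keys])
  have hgetD : ∀ c, D.getD c [] = (pairs.filter (fun p => p.1 == c)).map (fun p => p.2) := by
    intro c
    rw [hD, PySem.Dict.getD_foldl_modify_append pairs (PySem.Dict.mk []) c]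
    rfl
  have hitems : D.items = (PySem.Set.ofList (pairs.map (fun p => p.1))).map
      (fun c => (c, (pairs.filter (fun p => p.1 == c)).map (fun p => p.2))) := by
    rw [PySem.Dict.items_eq_map_keys D hnd [], hkeys]
    exact List.map_congr_left (fun c _ => by rw [hgetD])
  apply PySem.List.sorted_eq_of_perm_of_pairwise_lt
  · rw [hitems]
    exact (PySem.List.sorted_perm _ _ _).map _
  · rw [List.pairwise_map]
    exact PySem.List.sorted_ofList_pairwise_lt _

theorem pv_eq (indicators : List (List (String × String))) :
    generate_discovery_report indicators = generate_discovery_report_alt indicators := by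
  unfold generate_discovery_report generate_discovery_report_alt
  by_cases hnil : indicators = []
  · simp [hnil]
  · rw [if_neg hnil, if_neg hnil]
    have hgrp : indicators.foldl
        (fun cs ind =>
          let category := (PySem.Dict.mk ind).getD "category" "unknown"
          let name := (PySem.Dict.mk ind).getD "name" ""
          let cs := if cs.contains category then cs else cs.insert category ([] : List String)
          cs.modify category [] (fun l => l ++ [name])) (PySem.Dict.mk [])
      = (indicators.map (fun i => ((PySem.Dict.mk i).getD "category" "unknown", (PySem.Dict.mk i).getD "name" ""))).foldl
          (fun d p => d.modify p.1 [] (fun l => l ++ [p.2])) (PySem.Dict.mk []) := by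
      rw [List.foldl_map]
      exact List.foldl_ext _ _ _ (fun cs ind _ => pv_step_eq cs _ _)
    simp only [hgrp]
    rw [pv_items_eq, List.foldl_map]
    refine congrArg _ (List.foldl_ext _ _ _ ?_)
    intro ls c _
    rw [PySem.List.foldl_append_singleton_eq_map (fun n => "  - " ++ n)]
    simp [PySem.List.length_sorted, List.append_assoc]

-- ===== VERDICT (by name: the statement is the Claim_ definition above) =====
theorem generate_discovery_report_spec : Claim_equal_generate_discovery_report := by
  intro indicators _ _
  exact pv_eq indicators
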